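-- pv_equiv track=rewrite | github.com/HenryQin818/qoreon | task_dashboard/project_source.py | resolve_project_source
-- ===== SOURCE A (Python) =====
-- from typing import Any
--
-- def _as_str(v: Any) -> str:
--     return "" if v is None else str(v)
--
-- def _norm(path: Any) -> str:
--     return _as_str(path).replace('\\', '/').strip()
--
-- def resolve_project_source(project: dict[str, Any]) -> dict[str, str]:
--     project_root = _norm(project.get('project_root_rel'))
--     task_root = _norm(project.get('task_root_rel'))
--     runtime_root = _norm(project.get('runtime_root_rel'))
--     candidates = [project_root, task_root, runtime_root]
--
--     def _has(marker: str) -> bool: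
--         token = f'/{marker}/'
--         return any(token in f'/{c.strip("/")}/' for c in candidates if c)
--
--     if _has('sandbox_projects'):
--         return {'source_kind': 'sandbox', 'source_label': 'sandbox_projects'}
--     if _has('fixtures'):
--         return {'source_kind': 'fixtures', 'source_label': 'fixtures'}
--     if _has('.runtime'):
--         return {'source_kind': 'runtime', 'source_label': '.runtime'}
--     if project_root or task_root:
--         return {'source_kind': 'workspace', 'source_label': 'workspace'}
--     return {'source_kind': 'unknown', 'source_label': ''}
-- ===== SOURCE B (Python) =====
-- from typing import Any
--
-- def _as_str(v: Any) -> str: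
--     return "" if v is None else str(v)
--
-- def _norm(path: Any) -> str:
--     return _as_str(path).replace('\\', '/').strip()
--
-- _OUTCOMES = {0: ('sandbox', 'sandbox_projects'),
--              1: ('fixtures', 'fixtures'),
--              2: ('runtime', '.runtime')}
--
-- def _rank(c: str) -> int:
--     # best (lowest) marker priority present in this candidate's path segments
--     if not c:
--         return 3
--     segments = c.strip('/').split('/')
--     if 'sandbox_projects' in segments:
--         return 0
--     if 'fixtures' in segments:
--         return 1
--     if '.runtime' in segments:
--         return 2
--     return 3
--
-- def resolve_project_source(project: dict[str, Any]) -> dict[str, str]: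
--     project_root = _norm(project.get('project_root_rel'))
--     task_root = _norm(project.get('task_root_rel'))
--     runtime_root = _norm(project.get('runtime_root_rel'))
--     best = min(_rank(project_root), _rank(task_root), _rank(runtime_root))
--     hit = _OUTCOMES.get(best)
--     if hit is not None:
--         return {'source_kind': hit[0], 'source_label': hit[1]}
--     if project_root or task_root:
--         return {'source_kind': 'workspace', 'source_label': 'workspace'}
--     return {'source_kind': 'unknown', 'source_label': ''}
-- ===== Notes on version B (the rewrite author's own statement) =====
-- stated objective: alternative
-- what changed: Replaces A's marker-major substring scans (each of three '/marker/' tokens searched as a substring of every wrapped candidate) by a candidate-major algorithm with a different membership primitive: each candidate is tokenized once into its path segments via strip('/').split('/'), given a numeric priority rank by exact segment membership, and the classification is the numeric minimum of the three ranks looked up in an outcome table.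
import Mathlib
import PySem

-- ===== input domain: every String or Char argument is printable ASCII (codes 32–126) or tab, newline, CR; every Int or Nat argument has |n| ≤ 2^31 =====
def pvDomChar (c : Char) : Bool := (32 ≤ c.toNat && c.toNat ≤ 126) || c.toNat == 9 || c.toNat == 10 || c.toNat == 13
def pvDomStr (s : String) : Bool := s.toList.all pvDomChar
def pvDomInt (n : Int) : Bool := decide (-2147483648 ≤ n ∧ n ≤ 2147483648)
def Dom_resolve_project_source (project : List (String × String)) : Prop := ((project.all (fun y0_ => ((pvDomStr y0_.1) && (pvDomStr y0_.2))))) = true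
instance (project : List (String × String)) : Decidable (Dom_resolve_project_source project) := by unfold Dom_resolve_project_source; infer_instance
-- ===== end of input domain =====

-- B reworks the classification: instead of searching each '/marker/' token as a substring of
-- every wrapped candidate (marker-major), it tokenizes each candidate once into its '/'-separated
-- path segments, ranks each candidate by exact segment membership, and classifies by the minimum
-- rank via an outcome table. Alternative decomposition, same cost class.

-- ===== PORT A =====
-- _as_str(v): "" if v is None else str(v)   (values here are strings)
def pv_as_str (v : Option String) : String :=
  match v with
  | none => ""
  | some s => s

-- _norm(path): _as_str(path).replace('\\', '/').strip()
def pv_norm (v : Option String) : String :=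
  PySem.Str.strip (PySem.Str.replace (pv_as_str v) "\\" "/")

-- f'/{s}/'  (built on toList: Lean's String.append is opaque to the kernel)
def pvWrap (s : String) : String := String.ofList ('/' :: s.toList ++ ['/'])

-- _has(marker): any(token in f'/{c.strip("/")}/' for c in candidates if c)
def pv_has (marker : String) (candidates : List String) : Bool :=
  candidates.any (fun c =>
    (c != "") && PySem.Str.isIn (pvWrap marker) (pvWrap (PySem.Str.stripChars c "/")))

def resolve_project_source (project : List (String × String)) : List (String × String) :=
  let d := PySem.Dict.mk project
  let project_root := pv_norm (d.get? "project_root_rel")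
  let task_root := pv_norm (d.get? "task_root_rel")
  let runtime_root := pv_norm (d.get? "runtime_root_rel")
  let candidates := [project_root, task_root, runtime_root]
  if pv_has "sandbox_projects" candidates then
    [("source_kind", "sandbox"), ("source_label", "sandbox_projects")]
  else if pv_has "fixtures" candidates then
    [("source_kind", "fixtures"), ("source_label", "fixtures")]
  else if pv_has ".runtime" candidates then
    [("source_kind", "runtime"), ("source_label", ".runtime")]
  else if project_root != "" || task_root != "" then
    [("source_kind", "workspace"), ("source_label", "workspace")]
  else
    [("source_kind", "unknown"), ("source_label", "")]

-- ===== PORT B =====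
-- _OUTCOMES = {0: ('sandbox', 'sandbox_projects'), 1: ('fixtures', 'fixtures'), 2: ('runtime', '.runtime')}
def pvOutcomes : List (Int × (String × String)) :=
  [(0, ("sandbox", "sandbox_projects")), (1, ("fixtures", "fixtures")), (2, ("runtime", ".runtime"))]

-- _rank(c): priority rank of the best marker occurring among c's path segments
-- (c.strip('/').split('/') ported as List.splitOn on the character list)
def pvRank (c : String) : Int :=
  if c == "" then 3
  else
    let segments := List.splitOn '/' (PySem.Str.stripChars c "/").toList
    if segments.contains "sandbox_projects".toList then 0
    else if segments.contains "fixtures".toList then 1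
    else if segments.contains ".runtime".toList then 2
    else 3

-- best = min of the three ranks; hit = _OUTCOMES.get(best); then the two fallthrough branches
def pvClassify (project_root task_root runtime_root : String) : List (String × String) :=
  let best := min (min (pvRank project_root) (pvRank task_root)) (pvRank runtime_root)
  match PySem.Dict.get? (PySem.Dict.mk pvOutcomes) best with
  | some hit => [("source_kind", hit.1), ("source_label", hit.2)]
  | none =>
    if project_root != "" || task_root != "" then
      [("source_kind", "workspace"), ("source_label", "workspace")]
    else
      [("source_kind", "unknown"), ("source_label", "")]

def resolve_project_source_alt (project : List (String × String)) : List (String × String) :=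
  let d := PySem.Dict.mk project
  let project_root := pv_norm (d.get? "project_root_rel")
  let task_root := pv_norm (d.get? "task_root_rel")
  let runtime_root := pv_norm (d.get? "runtime_root_rel")
  pvClassify project_root task_root runtime_root

-- ===== PRECONDITION & SPEC =====
def Spec_resolve_project_source (project : List (String × String)) (out : List (String × String)) : Prop := out = resolve_project_source_alt project
instance (project : List (String × String)) (out : List (String × String)) : Decidable (Spec_resolve_project_source project out) := by unfold Spec_resolve_project_source; infer_instance

-- ===== CLAIM (what is proved, stated in full; the proofs are below) =====
def Claim_equal_resolve_project_source : Prop := ∀ (project : List (String × String)), Dom_resolve_project_source project → Spec_resolve_project_source project (resolve_project_source project)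

-- ===== LEMMAS AND PROOFS =====

-- the wrapped marker sits inside an intercalation that lists it as a piece
lemma wrap_infix_intercalate (m : List Char) (b : List (List Char)) :
    ∀ (a : List (List Char)),
      ('/' :: m ++ ['/']) <:+: ('/' :: (['/'].intercalate (a ++ m :: b)) ++ ['/']) := by
  intro a
  induction a with
  | nil =>
    cases b with
    | nil => simp [List.intercalate]
    | cons b0 b' =>
      refine ⟨[], ['/'].intercalate (b0 :: b') ++ ['/'], ?_⟩
      simp [List.intercalate, List.intersperse_cons₂]
  | cons a0 a' ih =>
    obtain ⟨u, v, huv⟩ := ih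
    refine ⟨('/' :: a0) ++ u, v, ?_⟩
    have hne : a' ++ m :: b ≠ [] := by simp
    obtain ⟨c0, cs, hcc⟩ := List.exists_cons_of_ne_nil hne
    simp only [List.cons_append, hcc] at huv ⊢
    rw [show ['/'].intercalate (a0 :: c0 :: cs) = a0 ++ '/' :: ['/'].intercalate (c0 :: cs) by
        simp [List.intercalate, List.intersperse_cons₂]]
    simp only [List.append_assoc, List.cons_append] at huv ⊢
    rw [huv]

lemma infix_iff_mem_splitOn (m s : List Char) (hm1 : m ≠ []) (hm2 : '/' ∉ m) :
    (('/' :: m ++ ['/']) <:+: ('/' :: s ++ ['/'])) ↔ m ∈ List.splitOn '/' s := by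
  constructor
  · rintro ⟨u, v, huv⟩
    have heq : u ++ '/' :: (m ++ '/' :: v) = '/' :: (s ++ '/' :: ([] : List Char)) := by
      simpa [List.append_assoc] using huv
    have h2 := congrArg (List.splitOnP (fun x => x == '/')) heq
    rw [List.splitOnP_append_cons _ _ _ _ (by simp),
        List.splitOnP_first _ m (by intro x hx hx'; exact hm2 ((beq_iff_eq.mp hx') ▸ hx)) '/' (by simp) v] at h2
    rw [show ('/' :: (s ++ '/' :: ([] : List Char))) = ('/' :: s) ++ '/' :: ([] : List Char) by simp] at h2
    rw [List.splitOnP_append_cons _ _ _ _ (by simp)] at h2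
    rw [List.splitOnP_cons] at h2
    rw [if_pos (by simp)] at h2
    have hmem : m ∈ List.splitOnP (fun x => x == '/') u ++ m :: List.splitOnP (fun x => x == '/') v := by
      exact List.mem_append_right _ (List.mem_cons_self)
    rw [h2] at hmem
    simp only [List.splitOn]
    rcases List.mem_cons.mp hmem with h | h
    · exact absurd h hm1
    · rcases List.mem_append.mp h with h' | h'
      · exact h'
      · simp at h'; exact absurd h' hm1
  · intro h
    obtain ⟨a, b, hab⟩ := List.append_of_mem h
    have hs : ['/'].intercalate (a ++ m :: b) = s := by
      rw [← hab]; exact List.intercalate_splitOn s '/'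
    have := wrap_infix_intercalate m b a
    rwa [hs] at this


lemma isIn_eq_contains (m : String) (hm1 : m.toList ≠ []) (hm2 : '/' ∉ m.toList) (c : String) :
    PySem.Str.isIn (pvWrap m) (pvWrap (PySem.Str.stripChars c "/"))
      = (List.splitOn '/' (PySem.Str.stripChars c "/").toList).contains m.toList := by
  have hiff : PySem.Str.isIn (pvWrap m) (pvWrap (PySem.Str.stripChars c "/")) = true
      ↔ m.toList ∈ List.splitOn '/' (PySem.Str.stripChars c "/").toList := by
    rw [PySem.Str.isIn_iff_infix]
    have h1 : (pvWrap m).toList = '/' :: m.toList ++ ['/'] := by simp [pvWrap]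
    have h2 : (pvWrap (PySem.Str.stripChars c "/")).toList
        = '/' :: (PySem.Str.stripChars c "/").toList ++ ['/'] := by simp [pvWrap]
    rw [h1, h2]
    exact infix_iff_mem_splitOn _ _ hm1 hm2
  cases hc : (List.splitOn '/' (PySem.Str.stripChars c "/").toList).contains m.toList with
  | true => simp only [List.contains_eq_mem, decide_eq_true_eq] at hc; exact hiff.mpr hc
  | false =>
    simp only [List.contains_eq_mem, decide_eq_false_iff_not] at hc
    exact Bool.eq_false_iff.mpr (fun h => hc (hiff.mp h))

-- pvMatch m c: A's per-candidate test 'c and /m/ in /c.strip('/')/' (proof-side abbreviation)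
def pvMatch (m c : String) : Bool :=
  (c != "") && PySem.Str.isIn (pvWrap m) (pvWrap (PySem.Str.stripChars c "/"))

lemma rank_range (c : String) : (0 : Int) ≤ pvRank c ∧ pvRank c ≤ 3 := by
  simp only [pvRank]; split_ifs <;> constructor <;> omega

lemma rank_spec (c : String) :
    (pvRank c = 0 ↔ pvMatch "sandbox_projects" c = true) ∧
    (pvRank c = 1 ↔ (pvMatch "sandbox_projects" c = false ∧ pvMatch "fixtures" c = true)) ∧
    (pvRank c = 2 ↔ (pvMatch "sandbox_projects" c = false ∧ pvMatch "fixtures" c = false ∧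
        pvMatch ".runtime" c = true)) ∧
    (pvRank c = 3 ↔ (pvMatch "sandbox_projects" c = false ∧ pvMatch "fixtures" c = false ∧
        pvMatch ".runtime" c = false)) := by
  by_cases hc : c = ""
  · subst hc; decide
  · have hc' : (c == "") = false := beq_eq_false_iff_ne.mpr hc
    simp only [pvRank, pvMatch,
      isIn_eq_contains "sandbox_projects" (by decide) (by decide),
      isIn_eq_contains "fixtures" (by decide) (by decide),
      isIn_eq_contains ".runtime" (by decide) (by decide),
      hc', bne, Bool.not_false, Bool.true_and]
    cases h1 : (List.splitOn '/' (PySem.Str.stripChars c "/").toList).contains "sandbox_projects".toList <;>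
    cases h2 : (List.splitOn '/' (PySem.Str.stripChars c "/").toList).contains "fixtures".toList <;>
    cases h3 : (List.splitOn '/' (PySem.Str.stripChars c "/").toList).contains ".runtime".toList <;>
      simp

lemma min3_eq_of (r1 r2 r3 k : Int) (h : r1 = k ∨ r2 = k ∨ r3 = k)
    (h1 : k ≤ r1) (h2 : k ≤ r2) (h3 : k ≤ r3) : min (min r1 r2) r3 = k := by
  have a1 := min_le_left (min r1 r2) r3
  have a2 := min_le_right (min r1 r2) r3
  have a3 := min_le_left r1 r2
  have a4 := min_le_right r1 r2
  have b := le_min (le_min h1 h2) h3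
  omega

lemma has_eq (m p t r : String) :
    pv_has m [p, t, r] = (pvMatch m p || (pvMatch m t || pvMatch m r)) := by
  simp [pv_has, pvMatch]

lemma core_eq (p t r : String) :
    (if pv_has "sandbox_projects" [p, t, r] then
      [("source_kind", "sandbox"), ("source_label", "sandbox_projects")]
    else if pv_has "fixtures" [p, t, r] then
      [("source_kind", "fixtures"), ("source_label", "fixtures")]
    else if pv_has ".runtime" [p, t, r] then
      [("source_kind", "runtime"), ("source_label", ".runtime")]
    else if p != "" || t != "" then
      [("source_kind", "workspace"), ("source_label", "workspace")]
    else
      [("source_kind", "unknown"), ("source_label", "")])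
    =
    pvClassify p t r := by
  obtain ⟨Sp0, Sp1, Sp2, Sp3⟩ := rank_spec p
  obtain ⟨St0, St1, St2, St3⟩ := rank_spec t
  obtain ⟨Sr0, Sr1, Sr2, Sr3⟩ := rank_spec r
  have Rp := rank_range p; have Rt := rank_range t; have Rr := rank_range r
  simp only [pvClassify]
  by_cases Hs : pv_has "sandbox_projects" [p, t, r] = true
  · have hw : pvMatch "sandbox_projects" p = true ∨ pvMatch "sandbox_projects" t = true ∨
        pvMatch "sandbox_projects" r = true := by
      have := (has_eq "sandbox_projects" p t r) ▸ Hs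
      simpa using this
    have hbest : min (min (pvRank p) (pvRank t)) (pvRank r) = 0 := by
      refine min3_eq_of _ _ _ _ ?_ Rp.1 Rt.1 Rr.1
      rcases hw with h | h | h
      · exact Or.inl (Sp0.mpr h)
      · exact Or.inr (Or.inl (St0.mpr h))
      · exact Or.inr (Or.inr (Sr0.mpr h))
    rw [hbest, if_pos Hs]
    rfl
  · have Hs' : pv_has "sandbox_projects" [p, t, r] = false := by
      simpa using Hs
    have hnos : pvMatch "sandbox_projects" p = false ∧ pvMatch "sandbox_projects" t = false ∧
        pvMatch "sandbox_projects" r = false := by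
      have := (has_eq "sandbox_projects" p t r) ▸ Hs'
      simpa using this
    by_cases Hf : pv_has "fixtures" [p, t, r] = true
    · have hw : pvMatch "fixtures" p = true ∨ pvMatch "fixtures" t = true ∨
          pvMatch "fixtures" r = true := by
        have := (has_eq "fixtures" p t r) ▸ Hf
        simpa using this
      have np : pvRank p ≠ 0 := fun h => by rw [Sp0.mp h] at hnos; exact absurd hnos.1 (by simp)
      have nt : pvRank t ≠ 0 := fun h => by rw [St0.mp h] at hnos; exact absurd hnos.2.1 (by simp)
      have nr : pvRank r ≠ 0 := fun h => by rw [Sr0.mp h] at hnos; exact absurd hnos.2.2 (by simp)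
      have hp1 : (1 : Int) ≤ pvRank p := by omega
      have ht1 : (1 : Int) ≤ pvRank t := by omega
      have hr1 : (1 : Int) ≤ pvRank r := by omega
      have hbest : min (min (pvRank p) (pvRank t)) (pvRank r) = 1 := by
        refine min3_eq_of _ _ _ _ ?_ hp1 ht1 hr1
        rcases hw with h | h | h
        · exact Or.inl (Sp1.mpr ⟨hnos.1, h⟩)
        · exact Or.inr (Or.inl (St1.mpr ⟨hnos.2.1, h⟩))
        · exact Or.inr (Or.inr (Sr1.mpr ⟨hnos.2.2, h⟩))
      rw [hbest, if_neg Hs, if_pos Hf]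
      rfl
    · have Hf' : pv_has "fixtures" [p, t, r] = false := by simpa using Hf
      have hnof : pvMatch "fixtures" p = false ∧ pvMatch "fixtures" t = false ∧
          pvMatch "fixtures" r = false := by
        have := (has_eq "fixtures" p t r) ▸ Hf'
        simpa using this
      have np : pvRank p ≠ 0 ∧ pvRank p ≠ 1 :=
        ⟨fun h => by rw [Sp0.mp h] at hnos; exact absurd hnos.1 (by simp),
         fun h => by rw [(Sp1.mp h).2] at hnof; exact absurd hnof.1 (by simp)⟩
      have nt : pvRank t ≠ 0 ∧ pvRank t ≠ 1 :=
        ⟨fun h => by rw [St0.mp h] at hnos; exact absurd hnos.2.1 (by simp),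
         fun h => by rw [(St1.mp h).2] at hnof; exact absurd hnof.2.1 (by simp)⟩
      have nr : pvRank r ≠ 0 ∧ pvRank r ≠ 1 :=
        ⟨fun h => by rw [Sr0.mp h] at hnos; exact absurd hnos.2.2 (by simp),
         fun h => by rw [(Sr1.mp h).2] at hnof; exact absurd hnof.2.2 (by simp)⟩
      by_cases Hr : pv_has ".runtime" [p, t, r] = true
      · have hw : pvMatch ".runtime" p = true ∨ pvMatch ".runtime" t = true ∨
            pvMatch ".runtime" r = true := by
          have := (has_eq ".runtime" p t r) ▸ Hr
          simpa using this
        have hp2 : (2 : Int) ≤ pvRank p := by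
          have h1 := np.1; have h2 := np.2; omega
        have ht2 : (2 : Int) ≤ pvRank t := by
          have h1 := nt.1; have h2 := nt.2; omega
        have hr2 : (2 : Int) ≤ pvRank r := by
          have h1 := nr.1; have h2 := nr.2; omega
        have hbest : min (min (pvRank p) (pvRank t)) (pvRank r) = 2 := by
          refine min3_eq_of _ _ _ _ ?_ hp2 ht2 hr2
          rcases hw with h | h | h
          · exact Or.inl (Sp2.mpr ⟨hnos.1, hnof.1, h⟩)
          · exact Or.inr (Or.inl (St2.mpr ⟨hnos.2.1, hnof.2.1, h⟩))
          · exact Or.inr (Or.inr (Sr2.mpr ⟨hnos.2.2, hnof.2.2, h⟩))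
        rw [hbest, if_neg Hs, if_neg Hf, if_pos Hr]
        rfl
      · have Hr' : pv_has ".runtime" [p, t, r] = false := by simpa using Hr
        have hnor : pvMatch ".runtime" p = false ∧ pvMatch ".runtime" t = false ∧
            pvMatch ".runtime" r = false := by
          have := (has_eq ".runtime" p t r) ▸ Hr'
          simpa using this
        have hep : pvRank p = 3 := Sp3.mpr ⟨hnos.1, hnof.1, hnor.1⟩
        have het : pvRank t = 3 := St3.mpr ⟨hnos.2.1, hnof.2.1, hnor.2.1⟩
        have her : pvRank r = 3 := Sr3.mpr ⟨hnos.2.2, hnof.2.2, hnor.2.2⟩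
        have hbest : min (min (pvRank p) (pvRank t)) (pvRank r) = 3 := by
          rw [hep, het, her]; rfl
        rw [hbest, if_neg Hs, if_neg Hf, if_neg Hr]
        rfl

-- ===== VERDICT (by name: the statement is the Claim_ definition above) =====
theorem resolve_project_source_spec : Claim_equal_resolve_project_source := by
  intro project _
  show resolve_project_source project = resolve_project_source_alt project
  exact Eq.trans
    (Eq.trans rfl
      (core_eq (pv_norm ((PySem.Dict.mk project).get? "project_root_rel"))
               (pv_norm ((PySem.Dict.mk project).get? "task_root_rel"))
               (pv_norm ((PySem.Dict.mk project).get? "runtime_root_rel"))))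
    rfl
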